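-- pv_equiv track=rewrite | github.com/damon-murdoch/emerald-battle-revolution | tools/bfg_helpers/src/common.py | pory_format
-- ===== SOURCE A (Python) =====
-- import unicodedata
--
-- def remove_accented_chars(text):
--     normalized_text = unicodedata.normalize('NFKD', text)
--     ascii_text = normalized_text.encode('ascii', 'ignore').decode('utf-8')
--     return ascii_text
--
-- def pory_format(string, delim="_"):
--
--     # Update formatting
--     pory_str = string.replace("_", " ").replace("-", " ")
--     pory_str = pory_str.replace("'", " ").replace(":", " ")
--
--     # Remove Brackets
--     pory_str = pory_str.replace("(", "").replace(")", "")
--     pory_str = pory_str.replace("[", "").replace("]", "")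
--     pory_str = pory_str.replace("{", "").replace("}", "")
--
--     # Remove accented characters
--     pory_str = remove_accented_chars(pory_str)
--
--     # Split the string on the spaces
--     split = pory_str.split(" ")
--
--     # Convert strings to upper case
--     for i in range(len(split)):
--         split[i] = split[i].capitalize()
--
--         # Special Case: 'EventScript'
--         if split[i] == "Eventscript":
--             split[i] = "EventScript"
--
--     # Return rejoined string
--     return delim.join(split)
-- ===== SOURCE B (Python) =====
-- import unicodedata
--
-- _SEPS = {" ", "_", "-", "'", ":"}
-- _DROP = {"(", ")", "[", "]", "{", "}"}
--
-- def _fix(word):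
--     return "EventScript" if word == "Eventscript" else word
--
-- def pory_format(string, delim="_"):
--     # Single pass: split, translate, accent-strip and capitalize in one
--     # state machine instead of staged whole-string passes.
--     out = []   # finished (already fixed) words
--     cur = []   # current word, capitalized as it is built
--     for c in string:
--         if c in _SEPS:
--             out.append(_fix("".join(cur)))
--             cur = []
--         elif c in _DROP:
--             continue
--         else:
--             for a in unicodedata.normalize("NFKD", c):
--                 if ord(a) < 128:
--                     cur.append(a.upper() if not cur else a.lower())
--     out.append(_fix("".join(cur)))
--     return delim.join(out)
-- ===== Notes on version B (the rewrite author's own statement) =====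
-- stated objective: alternative
-- what changed: A's staged whole-string passes (eight chained .replace calls, accent strip, split on spaces, per-word capitalize loop, join) are replaced by a single character-at-a-time state machine that classifies each character once and builds the capitalized, fixed words directly in one traversal.
import Mathlib
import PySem

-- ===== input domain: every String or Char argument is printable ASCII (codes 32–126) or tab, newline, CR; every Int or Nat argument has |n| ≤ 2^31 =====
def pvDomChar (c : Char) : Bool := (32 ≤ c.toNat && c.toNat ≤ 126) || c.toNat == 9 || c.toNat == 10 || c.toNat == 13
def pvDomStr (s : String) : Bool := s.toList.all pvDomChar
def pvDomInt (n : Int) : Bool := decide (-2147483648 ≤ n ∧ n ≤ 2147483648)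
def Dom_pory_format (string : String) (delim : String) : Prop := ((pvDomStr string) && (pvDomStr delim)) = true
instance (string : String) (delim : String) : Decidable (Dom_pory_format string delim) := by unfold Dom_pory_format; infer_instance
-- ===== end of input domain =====

-- B replaces A's staged whole-string passes (eight replaces, split, per-word capitalize, join)
-- by ONE character-at-a-time state machine that builds the capitalized words directly (alternative; same cost class).

-- ===== PORT A =====
-- remove_accented_chars: NFKD-normalize, encode('ascii','ignore'), decode.  Hand-ported as
-- "drop every non-ASCII code point": exact on the task's domain (ASCII input, where NFKD is the
-- identity and the encode/decode round-trip keeps exactly the ASCII characters).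
def pvRemoveAccents (cs : List Char) : List Char := cs.filter (fun c => c.toNat ≤ 127)

-- str.capitalize(): first character upper-cased, the rest lower-cased (exact on ASCII).
def pvCapitalize (cs : List Char) : List Char :=
  match cs with
  | [] => []
  | c :: t => PySem.Chars.upperChar c :: PySem.Chars.lower t

def pory_format (string : String) (delim : String) : String :=
  -- Update formatting
  let p1 := PySem.Chars.replace string.toList ['_'] [' ']
  let p2 := PySem.Chars.replace p1 ['-'] [' ']
  let p3 := PySem.Chars.replace p2 ['\''] [' ']
  let p4 := PySem.Chars.replace p3 [':'] [' ']
  -- Remove Brackets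
  let p5 := PySem.Chars.replace p4 ['('] []
  let p6 := PySem.Chars.replace p5 [')'] []
  let p7 := PySem.Chars.replace p6 ['['] []
  let p8 := PySem.Chars.replace p7 [']'] []
  let p9 := PySem.Chars.replace p8 ['{'] []
  let p10 := PySem.Chars.replace p9 ['}'] []
  -- Remove accented characters
  let p := pvRemoveAccents p10
  -- Split the string on the spaces
  let split := PySem.Chars.splitOn p [' ']
  -- Convert strings to upper case (with the 'EventScript' special case)
  let split := split.map (fun w =>
    let w := pvCapitalize w
    if w = "Eventscript".toList then "EventScript".toList else w)
  -- Return rejoined string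
  String.ofList (PySem.Chars.join delim.toList split)

-- ===== PORT B =====
-- _fix(word)
def pvFix (w : List Char) : List Char :=
  if w = "Eventscript".toList then "EventScript".toList else w

-- the loop body of B's state machine: state = (finished fixed words, current capitalized word).
-- The per-character NFKD+ascii-ignore of Source B is ported as "keep iff ASCII" (exact on the ASCII domain).
def pvStep (st : List (List Char) × List Char) (c : Char) : List (List Char) × List Char :=
  if c = ' ' ∨ c = '_' ∨ c = '-' ∨ c = '\'' ∨ c = ':' then
    (st.1 ++ [pvFix st.2], [])
  else if c = '(' ∨ c = ')' ∨ c = '[' ∨ c = ']' ∨ c = '{' ∨ c = '}' then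
    st
  else if c.toNat ≤ 127 then
    (st.1, st.2 ++ [if st.2 = [] then PySem.Chars.upperChar c else PySem.Chars.lowerChar c])
  else
    st

def pory_format_alt (string : String) (delim : String) : String :=
  let st := string.toList.foldl pvStep ([], [])
  String.ofList (PySem.Chars.join delim.toList (st.1 ++ [pvFix st.2]))

-- ===== PRECONDITION & SPEC =====
def Spec_pory_format (string : String) (delim : String) (out : String) : Prop := out = pory_format_alt string delim
instance (string : String) (delim : String) (out : String) : Decidable (Spec_pory_format string delim out) := by unfold Spec_pory_format; infer_instance

-- ===== CLAIM (what is proved, stated in full; the proofs are below) =====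
def Claim_equal_pory_format : Prop := ∀ (string : String) (delim : String), Dom_pory_format string delim → Spec_pory_format string delim (pory_format string delim)

-- ===== LEMMAS AND PROOFS =====

-- a single-character replacement is a flatMap of a per-character substitution
def pvSub (a : Char) (bs : List Char) : Char → List Char := fun c => if c = a then bs else [c]

theorem pvReplace_go_single (a : Char) (bs : List Char) :
    ∀ (l : List Char) (fuel : Nat) (acc : List Char), l.length ≤ fuel →
      PySem.Chars.replace.go [a] bs fuel l acc = acc.reverse ++ l.flatMap (pvSub a bs) := by
  intro l
  induction l with
  | nil =>
    intro fuel acc _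
    cases fuel <;> simp [PySem.Chars.replace.go]
  | cons c t ih =>
    intro fuel acc h
    cases fuel with
    | zero => simp at h
    | succ n =>
      simp only [PySem.Chars.replace.go]
      by_cases hc : a = c
      · subst hc
        rw [if_pos (by simp), show List.drop [a].length (a :: t) = t from rfl,
          ih n (bs.reverse ++ acc) (by simpa using Nat.le_of_succ_le_succ h)]
        simp [pvSub]
      · rw [if_neg (by simp [List.isPrefixOf, hc]),
          ih n (c :: acc) (by simpa using Nat.le_of_succ_le_succ h)]
        have hca : ¬ c = a := fun hh => hc hh.symm
        simp [pvSub, hca]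

theorem pvReplace_single (cs : List Char) (a : Char) (bs : List Char) :
    PySem.Chars.replace cs [a] bs = cs.flatMap (pvSub a bs) := by
  unfold PySem.Chars.replace
  rw [if_neg (by simp)]
  simpa using pvReplace_go_single a bs cs cs.length [] le_rfl

-- the per-character effect of A's whole pipeline up to the split: translate, then ascii-filter
def pvTc (c : Char) : List Char :=
  if c = ' ' ∨ c = '_' ∨ c = '-' ∨ c = '\'' ∨ c = ':' then [' ']
  else if c = '(' ∨ c = ')' ∨ c = '[' ∨ c = ']' ∨ c = '{' ∨ c = '}' then []
  else if c.toNat ≤ 127 then [c]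
  else []

-- the ten substitutions followed by the ascii filter are exactly pvTc, character by character
theorem pvChain_eq (cs : List Char) :
    pvRemoveAccents
      ((((((((((cs.flatMap (pvSub '_' [' '])).flatMap (pvSub '-' [' '])).flatMap
        (pvSub '\'' [' '])).flatMap (pvSub ':' [' '])).flatMap (pvSub '(' [])).flatMap
        (pvSub ')' [])).flatMap (pvSub '[' [])).flatMap (pvSub ']' [])).flatMap
        (pvSub '{' [])).flatMap (pvSub '}' [])) = cs.flatMap pvTc := by
  unfold pvRemoveAccents
  simp only [List.flatMap_assoc, List.filter_flatMap]
  apply List.flatMap_congr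
  intro c _
  by_cases h0 : c = ' '; · subst h0; rfl
  by_cases h1 : c = '_'; · subst h1; rfl
  by_cases h2 : c = '-'; · subst h2; rfl
  by_cases h3 : c = '\''; · subst h3; rfl
  by_cases h4 : c = ':'; · subst h4; rfl
  by_cases h5 : c = '('; · subst h5; rfl
  by_cases h6 : c = ')'; · subst h6; rfl
  by_cases h7 : c = '['; · subst h7; rfl
  by_cases h8 : c = ']'; · subst h8; rfl
  by_cases h9 : c = '{'; · subst h9; rfl
  by_cases h10 : c = '}'; · subst h10; rfl
  by_cases ha : c.toNat ≤ 127 <;>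
    simp [pvSub, pvTc, h0, h1, h2, h3, h4, h5, h6, h7, h8, h9, h10, ha, List.filter]

-- splitOn with separator " " as a simple structural recursion
def pvSp : List Char → List (List Char)
  | [] => [[]]
  | c :: t => if c = ' ' then [] :: pvSp t else (pvSp t).modifyHead (c :: ·)

theorem pvSp_ne_nil (l : List Char) : pvSp l ≠ [] := by
  cases l with
  | nil => simp [pvSp]
  | cons c t =>
    simp only [pvSp]
    split
    · simp
    · intro h
      have hl := congrArg List.length h
      simp at hl
      exact pvSp_ne_nil t hl

theorem pvSplitOn_go_eq :
    ∀ (l : List Char) (fuel : Nat) (cur : List Char) (acc : List (List Char)), l.length < fuel →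
      PySem.Chars.splitOn.go [' '] fuel l cur acc
        = acc.reverse ++ (pvSp l).modifyHead (cur.reverse ++ ·) := by
  intro l
  induction l with
  | nil =>
    intro fuel cur acc h
    cases fuel with
    | zero => omega
    | succ n => simp [PySem.Chars.splitOn.go, pvSp]
  | cons c t ih =>
    intro fuel cur acc h
    cases fuel with
    | zero => omega
    | succ n =>
      by_cases hc : c = ' '
      · subst hc
        rw [show PySem.Chars.splitOn.go [' '] (n+1) (' ' :: t) cur acc
              = PySem.Chars.splitOn.go [' '] n t [] (cur.reverse :: acc) by
            simp [PySem.Chars.splitOn.go, List.isPrefixOf]]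
        rw [ih n [] (cur.reverse :: acc) (by simpa using Nat.lt_of_succ_lt_succ h)]
        obtain ⟨w, ws, hw⟩ := List.exists_cons_of_ne_nil (pvSp_ne_nil t)
        simp [pvSp, hw]
      · have hc' : ¬ ' ' = c := fun hh => hc hh.symm
        rw [show PySem.Chars.splitOn.go [' '] (n+1) (c :: t) cur acc
              = PySem.Chars.splitOn.go [' '] n t (c :: cur) acc by
            simp [PySem.Chars.splitOn.go, List.isPrefixOf, hc']]
        rw [ih n (c :: cur) acc (by simpa using Nat.lt_of_succ_lt_succ h)]
        obtain ⟨w, ws, hw⟩ := List.exists_cons_of_ne_nil (pvSp_ne_nil t)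
        simp [pvSp, hc, hw]

theorem pvSplitOn_eq (l : List Char) : PySem.Chars.splitOn l [' '] = pvSp l := by
  unfold PySem.Chars.splitOn
  rw [pvSplitOn_go_eq l (l.length + 1) [] [] (by omega)]
  obtain ⟨w, ws, hw⟩ := List.exists_cons_of_ne_nil (pvSp_ne_nil l)
  simp [hw]

-- building a word character by character, continuing an already-capitalized prefix
def pvWcap (cur : List Char) (w : List Char) : List Char :=
  w.foldl (fun cur c => cur ++ [if cur = [] then PySem.Chars.upperChar c else PySem.Chars.lowerChar c]) cur

theorem pvWcap_nil_cons (cur : List Char) (c : Char) (w : List Char) :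
    pvWcap cur (c :: w) = pvWcap (cur ++ [if cur = [] then PySem.Chars.upperChar c else PySem.Chars.lowerChar c]) w := rfl

theorem pvWcap_nonempty (cur : List Char) (h : cur ≠ []) (w : List Char) :
    pvWcap cur w = cur ++ PySem.Chars.lower w := by
  induction w generalizing cur with
  | nil => simp [pvWcap, PySem.Chars.lower]
  | cons c t ih =>
    rw [pvWcap_nil_cons, if_neg h, ih _ (by simp)]
    simp [PySem.Chars.lower]

theorem pvWcap_nil (w : List Char) : pvWcap [] w = pvCapitalize w := by
  cases w with
  | nil => rfl
  | cons c t =>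
    rw [pvWcap_nil_cons, if_pos rfl, pvWcap_nonempty _ (by simp)]
    rfl

-- the state machine's final state, as a recursion over the word list of the translated string
def pvPack (cur : List Char) : List (List Char) → List (List Char) × List Char
  | [] => ([], cur)
  | [w] => ([], pvWcap cur w)
  | w :: w' :: ws => (pvFix (pvWcap cur w) :: (pvPack [] (w' :: ws)).1, (pvPack [] (w' :: ws)).2)

theorem pvPack_sep (cur : List Char) (ws : List (List Char)) (h : ws ≠ []) :
    pvPack cur ([] :: ws) = (pvFix cur :: (pvPack [] ws).1, (pvPack [] ws).2) := by
  obtain ⟨w, ws', rfl⟩ := List.exists_cons_of_ne_nil h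
  simp [pvPack, pvWcap]

theorem pvPack_cons (cur : List Char) (c : Char) (ws : List (List Char)) (h : ws ≠ []) :
    pvPack cur (ws.modifyHead (c :: ·))
      = pvPack (cur ++ [if cur = [] then PySem.Chars.upperChar c else PySem.Chars.lowerChar c]) ws := by
  match ws with
  | [w] => simp [pvPack, pvWcap_nil_cons]
  | w :: w' :: ws' => simp [pvPack, pvWcap_nil_cons]

theorem pvFoldl_step (cs : List Char) :
    ∀ (out : List (List Char)) (cur : List Char),
      cs.foldl pvStep (out, cur)
        = (out ++ (pvPack cur (pvSp (cs.flatMap pvTc))).1,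
           (pvPack cur (pvSp (cs.flatMap pvTc))).2) := by
  induction cs with
  | nil => intro out cur; simp [pvSp, pvPack, pvWcap]
  | cons c t ih =>
    intro out cur
    by_cases hs : c = ' ' ∨ c = '_' ∨ c = '-' ∨ c = '\'' ∨ c = ':'
    · have h1 : pvStep (out, cur) c = (out ++ [pvFix cur], []) := by
        simp [pvStep, hs]
      have h2 : pvTc c = [' '] := by simp [pvTc, hs]
      have hne := pvSp_ne_nil (t.flatMap pvTc)
      simp only [List.foldl_cons, h1, ih, List.flatMap_cons, h2, List.singleton_append]
      rw [show pvSp (' ' :: t.flatMap pvTc) = [] :: pvSp (t.flatMap pvTc) by simp [pvSp]]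
      rw [pvPack_sep cur _ hne]
      simp
    · by_cases hb : c = '(' ∨ c = ')' ∨ c = '[' ∨ c = ']' ∨ c = '{' ∨ c = '}'
      · have h1 : pvStep (out, cur) c = (out, cur) := by simp [pvStep, hs, hb]
        have h2 : pvTc c = [] := by simp [pvTc, hs, hb]
        simp only [List.foldl_cons, h1, ih, List.flatMap_cons, h2, List.nil_append]
      · by_cases ha : c.toNat ≤ 127
        · have h1 : pvStep (out, cur) c
              = (out, cur ++ [if cur = [] then PySem.Chars.upperChar c else PySem.Chars.lowerChar c]) := by
            simp [pvStep, hs, hb, ha]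
          have h2 : pvTc c = [c] := by simp [pvTc, hs, hb, ha]
          have hcsp : ¬ c = ' ' := fun hh => hs (Or.inl hh)
          have hne := pvSp_ne_nil (t.flatMap pvTc)
          simp only [List.foldl_cons, h1, ih, List.flatMap_cons, h2, List.singleton_append]
          rw [show pvSp (c :: t.flatMap pvTc)
                = (pvSp (t.flatMap pvTc)).modifyHead (c :: ·) by simp [pvSp, hcsp]]
          rw [pvPack_cons cur c _ hne]
        · have h1 : pvStep (out, cur) c = (out, cur) := by simp [pvStep, hs, hb, ha]
          have h2 : pvTc c = [] := by simp [pvTc, hs, hb, ha]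
          simp only [List.foldl_cons, h1, ih, List.flatMap_cons, h2, List.nil_append]

theorem pvPack_join (ws : List (List Char)) (h : ws ≠ []) :
    (pvPack [] ws).1 ++ [pvFix (pvPack [] ws).2]
      = ws.map (fun w => pvFix (pvCapitalize w)) := by
  match ws with
  | [w] => simp [pvPack, pvWcap_nil]
  | w :: w' :: ws' =>
    have := pvPack_join (w' :: ws') (by simp)
    simp only [pvPack, List.map_cons, pvWcap_nil]
    simp only [List.cons_append, this, List.map_cons]

-- ===== VERDICT (by name: the statement is the Claim_ definition above) =====
theorem pory_format_spec : Claim_equal_pory_format := by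
  intro string delim _
  unfold Spec_pory_format pory_format pory_format_alt
  simp only [pvReplace_single, List.flatMap_assoc]
  rw [show pvRemoveAccents _ = string.toList.flatMap pvTc from by
    rw [← pvChain_eq string.toList]; simp only [List.flatMap_assoc]]
  rw [pvSplitOn_eq, pvFoldl_step string.toList [] []]
  have h := pvPack_join (pvSp (string.toList.flatMap pvTc)) (pvSp_ne_nil _)
  simpa [pvFix] using
    (congrArg (fun l => String.ofList (PySem.Chars.join delim.toList l)) h).symm
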